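-- pv_equiv track=rewrite | github.com/tgyuuAn/Algorithm | Hotel_Room_Assignment_python.py | solution
-- ===== SOURCE A (Python) =====
-- from collections import defaultdict, deque
--
-- def solution(k, room_number):
--     rooms = defaultdict(int)
--     answer = []
--
--     for number in room_number:
--         if rooms[number] == 0:
--             rooms[number] = number+1
--             answer.append(number)
--
--         else:
--             temp_list = [number]
--             temp_maxi = rooms[number]
--             while rooms[temp_maxi] != 0:
--                 temp_list.append(temp_maxi)
--                 temp_maxi = rooms[temp_maxi]
--
--             rooms[temp_maxi] = temp_maxi+1
--             answer.append(temp_maxi)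
--
--             for temp_number in temp_list:
--                 rooms[temp_number] = temp_maxi
--
--     return answer
-- ===== SOURCE B (Python) =====
-- # Same assignment, but the pointer walk + repointing is one recursive helper find
-- # (path compression on the unwind); the free/occupied branch split disappears.
-- def solution(k, room_number):
--     nxt = {}
--
--     def find(r):
--         t = nxt.get(r, 0)
--         if t == 0:
--             return r
--         nxt[r] = find(t)
--         return nxt[r]
--
--     answer = []
--     for number in room_number:
--         room = find(number)
--         nxt[room] = room + 1
--         answer.append(room)
--     return answer
-- ===== Notes on version B (the rewrite author's own statement) =====
-- stated objective: simpler
-- what changed: A's two-branch loop (explicit while-chase into temp_list, then claim the endpoint, then a second loop repointing the path) is replaced by one uniform recursive helper find(x) that locates the free endpoint and performs the path compression on the unwind; the caller just claims find(number) - the free/occupied branch split and the explicit path list disappear.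
import Mathlib
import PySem

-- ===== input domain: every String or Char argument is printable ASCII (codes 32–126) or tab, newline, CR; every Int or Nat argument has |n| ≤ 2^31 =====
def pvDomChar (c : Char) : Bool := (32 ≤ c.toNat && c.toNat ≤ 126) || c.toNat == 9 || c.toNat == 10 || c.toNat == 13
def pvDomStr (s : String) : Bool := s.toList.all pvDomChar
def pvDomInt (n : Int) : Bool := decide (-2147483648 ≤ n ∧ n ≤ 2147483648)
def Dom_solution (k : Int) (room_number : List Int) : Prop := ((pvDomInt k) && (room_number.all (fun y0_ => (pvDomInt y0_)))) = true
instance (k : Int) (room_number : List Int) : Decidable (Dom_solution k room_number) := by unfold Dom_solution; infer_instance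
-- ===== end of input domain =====

-- B replaces A's two-branch loop (explicit while-chase + post-loop repointing pass) by
-- one recursive find that compresses the path on the unwind (simpler decomposition,
-- same cost); return values proved equal.

-- ===== PORT A =====
-- A's inner while loop, ported with fuel = len(room_number): always sufficient, since
-- stored links strictly increase, every occupied key is a previously claimed room, and
-- at most one room is claimed per request (proved as `chase_main` / `foldAB` below).
-- The defaultdict read rooms[number] is modeled as getD _ 0: the zero entry a
-- defaultdict read would materialize is indistinguishable from a missing key through
-- every read A performs.
def chaseA (fuel : Nat) (rooms : PySem.Dict Int Int) (tl : List Int) (maxi : Int) :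
    List Int × Int :=
  match fuel with
  | 0 => (tl, maxi)
  | f+1 =>
    if rooms.getD maxi 0 ≠ 0 then chaseA f rooms (tl ++ [maxi]) (rooms.getD maxi 0)
    else (tl, maxi)

def stepA (fuel : Nat) (st : PySem.Dict Int Int × List Int) (number : Int) :
    PySem.Dict Int Int × List Int :=
  if st.1.getD number 0 = 0 then (st.1.insert number (number + 1), st.2 ++ [number])
  else
    let p := chaseA fuel st.1 [number] (st.1.getD number 0)
    (p.1.foldl (fun r t => r.insert t p.2) (st.1.insert p.2 (p.2 + 1)), st.2 ++ [p.2])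

def solution (k : Int) (room_number : List Int) : List Int :=
  (room_number.foldl (stepA room_number.length) (PySem.Dict.empty, [])).2

-- ===== PORT B =====
-- B's recursive find, with the dict threaded through the recursion (reads happen on the
-- way down, the compressing writes on the unwind, exactly as the Python executes);
-- fuel = len(room_number) + 1 (Source B's recursion depth is bounded the same way).
def findB (fuel : Nat) (nxt : PySem.Dict Int Int) (r : Int) :
    Int × PySem.Dict Int Int :=
  match fuel with
  | 0 => (r, nxt)
  | f+1 =>
    if nxt.getD r 0 = 0 then (r, nxt)
    else
      let p := findB f nxt (nxt.getD r 0)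
      (p.1, p.2.insert r p.1)

def stepB (fuel : Nat) (st : PySem.Dict Int Int × List Int) (number : Int) :
    PySem.Dict Int Int × List Int :=
  let p := findB fuel st.1 number
  (p.2.insert p.1 (p.1 + 1), st.2 ++ [p.1])

def solution_alt (k : Int) (room_number : List Int) : List Int :=
  (room_number.foldl (stepB (room_number.length + 1)) (PySem.Dict.empty, [])).2

-- ===== PRECONDITION & SPEC =====
def Spec_solution (k : Int) (room_number : List Int) (out : List Int) : Prop := out = solution_alt k room_number
instance (k : Int) (room_number : List Int) (out : List Int) : Decidable (Spec_solution k room_number out) := by unfold Spec_solution; infer_instance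

-- ===== CLAIM (what is proved, stated in full; the proofs are below) =====
def Claim_equal_solution : Prop := ∀ (k : Int) (room_number : List Int), Dom_solution k room_number → Spec_solution k room_number (solution k room_number)

-- ===== LEMMAS AND PROOFS =====

-- the two dict states agree on every lookup
def DictRel (d1 d2 : PySem.Dict Int Int) : Prop := ∀ y : Int, d1.getD y 0 = d2.getD y 0

-- stored links strictly increase
def Mono (d : PySem.Dict Int Int) : Prop := ∀ y : Int, d.getD y 0 ≠ 0 → y < d.getD y 0

-- every occupied key is a previously claimed room
def OccSub (d : PySem.Dict Int Int) (a : List Int) : Prop := ∀ y : Int, d.getD y 0 ≠ 0 → y ∈ a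

-- chase budget: number of distinct claimed rooms ≥ m
def mu (a : List Int) (m : Int) : Nat := (a.toFinset.filter (fun y => m ≤ y)).card

theorem mu_step (d : PySem.Dict Int Int) (a : List Int) (m : Int)
    (hM : Mono d) (hS : OccSub d a) (h : d.getD m 0 ≠ 0) :
    mu a (d.getD m 0) < mu a m := by
  unfold mu
  apply Finset.card_lt_card
  constructor
  · intro y hy
    simp only [Finset.mem_filter] at hy ⊢
    exact ⟨hy.1, le_trans (le_of_lt (hM m h)) hy.2⟩
  · intro hsub
    have hm : m ∈ a.toFinset.filter (fun y => m ≤ y) := by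
      simp only [Finset.mem_filter, List.mem_toFinset]
      exact ⟨hS m h, le_refl m⟩
    have := hsub hm
    simp only [Finset.mem_filter] at this
    exact absurd this.2 (not_le.mpr (hM m h))

theorem chase_param (f : Nat) (d : PySem.Dict Int Int) :
    ∀ (m : Int) (tl : List Int),
      chaseA f d tl m = (tl ++ (chaseA f d [] m).1, (chaseA f d [] m).2) := by
  induction f with
  | zero => intro m tl; simp [chaseA]
  | succ f ih =>
    intro m tl
    simp only [chaseA]
    by_cases h : d.getD m 0 = 0
    · simp [h]
    · simp only [h, ne_eq, not_false_eq_true, if_pos]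
      rw [ih (d.getD m 0) (tl ++ [m]), ih (d.getD m 0) ([] ++ [m])]
      simp

theorem chase_congr (f : Nat) (d1 d2 : PySem.Dict Int Int) (h : DictRel d1 d2) :
    ∀ (tl : List Int) (m : Int), chaseA f d1 tl m = chaseA f d2 tl m := by
  induction f with
  | zero => intro tl m; rfl
  | succ f ih =>
    intro tl m
    simp only [chaseA, h m]
    split
    · exact ih _ _
    · rfl

theorem chase_main (d : PySem.Dict Int Int) (a : List Int)
    (hM : Mono d) (hS : OccSub d a) :
    ∀ (F : Nat) (m : Int), mu a m ≤ F →
      d.getD (chaseA F d [] m).2 0 = 0 ∧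
      m ≤ (chaseA F d [] m).2 ∧
      (∀ t ∈ (chaseA F d [] m).1, d.getD t 0 ≠ 0 ∧ t < (chaseA F d [] m).2) ∧
      chaseA (F+1) d [] m = chaseA F d [] m := by
  intro F
  induction F with
  | zero =>
    intro m h
    have h0 : d.getD m 0 = 0 := by
      by_contra hocc
      have hm : m ∈ a.toFinset.filter (fun y => m ≤ y) := by
        simp only [Finset.mem_filter, List.mem_toFinset]
        exact ⟨hS m hocc, le_refl m⟩
      have hpos : 0 < mu a m := Finset.card_pos.mpr ⟨m, hm⟩
      omega
    exact ⟨h0, le_refl m, by simp [chaseA], by simp [chaseA, h0]⟩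
  | succ F ih =>
    intro m h
    by_cases h0 : d.getD m 0 = 0
    · have e1 : chaseA (F+1) d [] m = ([], m) := by simp [chaseA, h0]
      have e2 : chaseA (F+1+1) d [] m = ([], m) := by simp [chaseA, h0]
      rw [e1, e2]
      exact ⟨h0, le_refl m, by simp, rfl⟩
    · have hmu' : mu a (d.getD m 0) ≤ F := by
        have := mu_step d a m hM hS h0
        omega
      obtain ⟨q_free, q_le, q_mem, q_stab⟩ := ih (d.getD m 0) hmu'
      have e1 : chaseA (F+1) d [] m =
          ([m] ++ (chaseA F d [] (d.getD m 0)).1, (chaseA F d [] (d.getD m 0)).2) := by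
        simp only [chaseA]
        rw [if_pos h0, List.nil_append]
        exact chase_param F d (d.getD m 0) [m]
      have e2 : chaseA (F+1+1) d [] m =
          ([m] ++ (chaseA (F+1) d [] (d.getD m 0)).1, (chaseA (F+1) d [] (d.getD m 0)).2) := by
        rw [show chaseA (F+1+1) d [] m =
              (if d.getD m 0 ≠ 0 then chaseA (F+1) d ([] ++ [m]) (d.getD m 0)
               else ([], m)) from rfl]
        rw [if_pos h0, List.nil_append]
        exact chase_param (F+1) d (d.getD m 0) [m]
      rw [e1, e2, q_stab]
      refine ⟨q_free, le_trans (le_of_lt (hM m h0)) q_le, ?_, rfl⟩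
      intro t ht
      rcases List.mem_append.mp ht with hm | hq
      · rw [List.mem_singleton.mp hm]
        exact ⟨h0, lt_of_lt_of_le (hM m h0) q_le⟩
      · exact q_mem t hq

theorem getD_foldl_insert_const (l : List Int) (v : Int) :
    ∀ (d : PySem.Dict Int Int) (y : Int),
      (l.foldl (fun r t => r.insert t v) d).getD y 0 = if y ∈ l then v else d.getD y 0 := by
  induction l with
  | nil => intro d y; simp
  | cons t l ih =>
    intro d y
    simp only [List.foldl_cons, ih, PySem.Dict.getD_insert, List.mem_cons]
    by_cases h1 : y ∈ l <;> by_cases h2 : y = t <;> simp [h1, h2]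

theorem find_chase (d : PySem.Dict Int Int) (a : List Int)
    (hM : Mono d) (hS : OccSub d a) :
    ∀ (F : Nat) (m : Int), mu a m ≤ F →
      (findB (F+1) d m).1 = (chaseA F d [] m).2 ∧
      DictRel (findB (F+1) d m).2
        ((chaseA F d [] m).1.foldl
          (fun dd t => dd.insert t (chaseA F d [] m).2) d) := by
  intro F
  induction F with
  | zero =>
    intro m h
    have h0 : d.getD m 0 = 0 := by
      by_contra hocc
      have hm : m ∈ a.toFinset.filter (fun y => m ≤ y) := by
        simp only [Finset.mem_filter, List.mem_toFinset]
        exact ⟨hS m hocc, le_refl m⟩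
      have hpos : 0 < mu a m := Finset.card_pos.mpr ⟨m, hm⟩
      omega
    simp [findB, chaseA, h0, DictRel]
  | succ F ih =>
    intro m h
    by_cases h0 : d.getD m 0 = 0
    · simp [findB, chaseA, h0, DictRel]
    · have hmu' : mu a (d.getD m 0) ≤ F := by
        have := mu_step d a m hM hS h0
        omega
      obtain ⟨ih1, ih2⟩ := ih (d.getD m 0) hmu'
      have e1 : chaseA (F+1) d [] m =
          ([m] ++ (chaseA F d [] (d.getD m 0)).1, (chaseA F d [] (d.getD m 0)).2) := by
        simp only [chaseA]
        rw [if_pos h0, List.nil_append]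
        exact chase_param F d (d.getD m 0) [m]
      have e3 : findB (F+1+1) d m =
          ((findB (F+1) d (d.getD m 0)).1,
           (findB (F+1) d (d.getD m 0)).2.insert m (findB (F+1) d (d.getD m 0)).1) := by
        rw [show findB (F+1+1) d m =
              (if d.getD m 0 = 0 then (m, d)
               else ((findB (F+1) d (d.getD m 0)).1,
                     (findB (F+1) d (d.getD m 0)).2.insert m (findB (F+1) d (d.getD m 0)).1))
            from rfl]
        rw [if_neg h0]
      rw [e1, e3]
      refine ⟨ih1, ?_⟩
      intro y
      simp only [List.cons_append, List.nil_append, List.foldl_cons,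
        PySem.Dict.getD_insert, ih1]
      rw [getD_foldl_insert_const]
      have hy := ih2 y
      rw [getD_foldl_insert_const] at hy
      by_cases hym : y = m <;> by_cases hyq : y ∈ (chaseA F d [] (d.getD m 0)).1 <;>
        simp [hym, hyq, PySem.Dict.getD_insert] at hy ⊢ <;> simp [hy]

theorem step_rel (F : Nat) (d1 d2 : PySem.Dict Int Int) (a : List Int) (n : Int)
    (hM : Mono d1) (hS : OccSub d1 a) (hR : DictRel d1 d2)
    (hc : a.toFinset.card ≤ F) :
    (stepA (F+1) (d1, a) n).2 = (stepB (F+2) (d2, a) n).2 ∧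
    DictRel (stepA (F+1) (d1, a) n).1 (stepB (F+2) (d2, a) n).1 ∧
    Mono (stepA (F+1) (d1, a) n).1 ∧
    OccSub (stepA (F+1) (d1, a) n).1 (stepA (F+1) (d1, a) n).2 ∧
    ∃ e : Int, (stepA (F+1) (d1, a) n).2 = a ++ [e] := by
  by_cases h0 : d1.getD n 0 = 0
  · have h0' : d2.getD n 0 = 0 := (hR n) ▸ h0
    have hfB : findB (F+2) d2 n = (n, d2) := by simp [findB, h0']
    have eA : stepA (F+1) (d1, a) n = (d1.insert n (n+1), a ++ [n]) := by
      simp [stepA, h0]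
    have eB : stepB (F+2) (d2, a) n = (d2.insert n (n+1), a ++ [n]) := by
      simp [stepB, hfB]
    rw [eA, eB]
    refine ⟨rfl, ?_, ?_, ?_, ⟨n, rfl⟩⟩
    · intro y
      simp only [PySem.Dict.getD_insert]
      by_cases hy : y = n <;> simp [hy, hR y]
    · intro y hy
      simp only [PySem.Dict.getD_insert] at hy ⊢
      by_cases hyn : y = n
      · simp only [hyn] at hy ⊢
        omega
      · simp only [hyn] at hy ⊢
        exact hM y hy
    · intro y hy
      simp only [PySem.Dict.getD_insert] at hy
      by_cases hyn : y = n
      · simp [hyn]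
      · simp only [if_neg hyn] at hy
        exact List.mem_append_left _ (hS y hy)
  · have hmun : mu a n ≤ F := by
      have h1 : mu a n ≤ a.toFinset.card := Finset.card_filter_le _ _
      omega
    have hmu0 : mu a (d1.getD n 0) ≤ F := by
      have := mu_step d1 a n hM hS h0
      omega
    obtain ⟨q_free, q_le, q_mem, q_stab⟩ := chase_main d1 a hM hS F (d1.getD n 0) hmu0
    have hM2 : Mono d2 := by
      intro y hy
      rw [← hR y] at hy ⊢
      exact hM y hy
    have hS2 : OccSub d2 a := by
      intro y hy
      rw [← hR y] at hy
      exact hS y hy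
    obtain ⟨f1, f2⟩ := find_chase d2 a hM2 hS2 (F+1) n (by omega)
    have hcn : chaseA (F+1) d2 [] n =
        ([n] ++ (chaseA F d1 [] (d1.getD n 0)).1, (chaseA F d1 [] (d1.getD n 0)).2) := by
      rw [← chase_congr (F+1) d1 d2 hR [] n,
        show chaseA (F+1) d1 [] n =
          (if d1.getD n 0 ≠ 0 then chaseA F d1 ([] ++ [n]) (d1.getD n 0) else ([], n)) from rfl,
        if_pos h0, List.nil_append]
      exact chase_param F d1 (d1.getD n 0) [n]
    have hpA : chaseA (F+1) d1 [n] (d1.getD n 0) =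
        ([n] ++ (chaseA F d1 [] (d1.getD n 0)).1, (chaseA F d1 [] (d1.getD n 0)).2) := by
      rw [chase_param (F+1) d1 (d1.getD n 0) [n], q_stab]
    have hfree2 : (chaseA F d1 [] (d1.getD n 0)).2 ∉
        ([n] ++ (chaseA F d1 [] (d1.getD n 0)).1) := by
      intro hmem
      rcases List.mem_append.mp hmem with h1 | h2
      · rw [List.mem_singleton.mp h1] at q_free
        exact h0 q_free
      · exact (q_mem _ h2).1 q_free
    have eA : stepA (F+1) (d1, a) n =
        (([n] ++ (chaseA F d1 [] (d1.getD n 0)).1).foldl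
          (fun r t => r.insert t (chaseA F d1 [] (d1.getD n 0)).2)
          (d1.insert (chaseA F d1 [] (d1.getD n 0)).2 ((chaseA F d1 [] (d1.getD n 0)).2 + 1)),
         a ++ [(chaseA F d1 [] (d1.getD n 0)).2]) := by
      simp only [stepA]
      rw [if_neg h0, hpA]
    have eB : stepB (F+2) (d2, a) n =
        ((findB (F+2) d2 n).2.insert (chaseA F d1 [] (d1.getD n 0)).2
          ((chaseA F d1 [] (d1.getD n 0)).2 + 1),
         a ++ [(chaseA F d1 [] (d1.getD n 0)).2]) := by
      simp only [stepB]
      rw [show findB (F+2) d2 n = findB ((F+1)+1) d2 n from rfl, f1, hcn]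
    rw [hcn] at f2
    have hAd : ∀ y : Int, (stepA (F+1) (d1, a) n).1.getD y 0 =
        if y ∈ [n] ++ (chaseA F d1 [] (d1.getD n 0)).1 then (chaseA F d1 [] (d1.getD n 0)).2
        else if y = (chaseA F d1 [] (d1.getD n 0)).2 then (chaseA F d1 [] (d1.getD n 0)).2 + 1
        else d1.getD y 0 := by
      intro y
      rw [eA]
      simp only [getD_foldl_insert_const, PySem.Dict.getD_insert]
    have hBd : ∀ y : Int, (stepB (F+2) (d2, a) n).1.getD y 0 =
        if y = (chaseA F d1 [] (d1.getD n 0)).2 then (chaseA F d1 [] (d1.getD n 0)).2 + 1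
        else if y ∈ [n] ++ (chaseA F d1 [] (d1.getD n 0)).1 then (chaseA F d1 [] (d1.getD n 0)).2
        else d2.getD y 0 := by
      intro y
      rw [eB]
      simp only [PySem.Dict.getD_insert]
      rw [f2 y, getD_foldl_insert_const]
    refine ⟨by rw [eA, eB], ?_, ?_, ?_, ?_⟩
    · intro y
      rw [hAd y, hBd y]
      by_cases hye : y = (chaseA F d1 [] (d1.getD n 0)).2
      · rw [hye, if_neg hfree2, if_pos rfl, if_pos rfl]
      · by_cases hym : y ∈ [n] ++ (chaseA F d1 [] (d1.getD n 0)).1 <;>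
          simp [hye, hR y]
    · intro y hy
      rw [hAd y] at hy ⊢
      by_cases hym : y ∈ [n] ++ (chaseA F d1 [] (d1.getD n 0)).1
      · simp only [hym, if_pos] at hy ⊢
        rcases List.mem_append.mp hym with h1 | h2
        · rw [List.mem_singleton.mp h1]
          exact lt_of_lt_of_le (hM n h0) q_le
        · exact (q_mem _ h2).2
      · simp only [hym, if_false] at hy ⊢
        by_cases hye : y = (chaseA F d1 [] (d1.getD n 0)).2
        · simp only [hye] at hy ⊢
          omega
        · simp only [hye] at hy ⊢
          exact hM y hy
    · intro y hy
      rw [hAd y] at hy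
      rw [show (stepA (F+1) (d1, a) n).2 = a ++ [(chaseA F d1 [] (d1.getD n 0)).2] by rw [eA]]
      by_cases hym : y ∈ [n] ++ (chaseA F d1 [] (d1.getD n 0)).1
      · rcases List.mem_append.mp hym with h1 | h2
        · rw [List.mem_singleton.mp h1]
          exact List.mem_append_left _ (hS n h0)
        · exact List.mem_append_left _ (hS y (q_mem _ h2).1)
      · simp only [hym, if_false] at hy
        by_cases hye : y = (chaseA F d1 [] (d1.getD n 0)).2
        · rw [hye]
          exact List.mem_append_right _ (List.mem_singleton.mpr rfl)
        · simp only [hye] at hy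
          exact List.mem_append_left _ (hS y hy)
    · exact ⟨(chaseA F d1 [] (d1.getD n 0)).2, by rw [eA]⟩

theorem fold_rel (F : Nat) :
    ∀ (l : List Int) (d1 d2 : PySem.Dict Int Int) (a : List Int),
      Mono d1 → OccSub d1 a → DictRel d1 d2 → a.toFinset.card + l.length ≤ F + 1 →
      (l.foldl (stepA (F+1)) (d1, a)).2 = (l.foldl (stepB (F+2)) (d2, a)).2 := by
  intro l
  induction l with
  | nil => intro d1 d2 a _ _ _ _; rfl
  | cons n l ih =>
    intro d1 d2 a hM hS hR hlen
    have hc : a.toFinset.card ≤ F := by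
      simp only [List.length_cons] at hlen
      omega
    obtain ⟨hans, hrel, hM2, hS2, e, he⟩ := step_rel F d1 d2 a n hM hS hR hc
    simp only [List.foldl_cons]
    rw [show stepA (F+1) (d1, a) n =
          ((stepA (F+1) (d1, a) n).1, (stepA (F+1) (d1, a) n).2) from rfl,
        show stepB (F+2) (d2, a) n =
          ((stepB (F+2) (d2, a) n).1, (stepB (F+2) (d2, a) n).2) from rfl, ← hans]
    apply ih _ _ _ hM2 hS2 hrel
    rw [he]
    have hcard : (a ++ [e]).toFinset.card ≤ a.toFinset.card + 1 := by
      rw [List.toFinset_append]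
      exact le_trans (Finset.card_union_le _ _) (by simp)
    simp only [List.length_cons] at hlen
    omega

-- ===== VERDICT (by name: the statement is the Claim_ definition above) =====
theorem solution_spec : Claim_equal_solution := by
  intro k room_number _
  unfold Spec_solution solution solution_alt
  cases room_number with
  | nil => rfl
  | cons x xs =>
    exact fold_rel xs.length (x :: xs) PySem.Dict.empty PySem.Dict.empty []
      (fun y h => absurd rfl h) (fun y h => absurd rfl h) (fun y => rfl)
      (by simp)
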